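-- pv_equiv track=rewrite | github.com/SquareShiftTech/tableau-to-looker-accelerator | src/tableau_to_looker_parser/generators/connection_generator.py | _find_primary_connection
-- ===== SOURCE A (Python) =====
-- from typing import Dict, List
--
-- def _find_primary_connection(connections: List[Dict]) -> Dict:
--     """Find the primary connection to use."""
--     # Find the primary BigQuery connection (skip federated wrapper)
--     for conn in connections:
--         if conn.get("type") == "bigquery" and conn.get("name"):
--             return conn
--
--     # Fallback to first non-federated connection
--     for conn in connections:
--         if conn.get("type") != "federated":
--             return conn
--
--     # Final fallback to first connection
--     return connections[0] if connections else {}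
-- ===== SOURCE B (Python) =====
-- from typing import Dict, List
--
-- def _named_bigquery(conn: Dict) -> bool:
--     return conn.get("type") == "bigquery" and bool(conn.get("name"))
--
-- def _non_federated(conn: Dict) -> bool:
--     return conn.get("type") != "federated"
--
-- def _find_primary_connection(connections: List[Dict]) -> Dict:
--     """Single pass: return the first named bigquery connection immediately;
--     otherwise remember the first non-federated one; fall back to the first
--     connection, or {} if the list is empty."""
--     first_non_federated = None
--     for conn in connections:
--         if _named_bigquery(conn):
--             return conn
--         if first_non_federated is None and _non_federated(conn):
--             first_non_federated = conn
--     if first_non_federated is not None: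
--         return first_non_federated
--     return connections[0] if connections else {}
-- ===== Notes on version B (the rewrite author's own statement) =====
-- stated objective: alternative
-- what changed: Replaced A's two sequential scans plus a tail fallback by a single loop that returns a named bigquery connection immediately and otherwise tracks the first non-federated connection in a local.
import Mathlib
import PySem

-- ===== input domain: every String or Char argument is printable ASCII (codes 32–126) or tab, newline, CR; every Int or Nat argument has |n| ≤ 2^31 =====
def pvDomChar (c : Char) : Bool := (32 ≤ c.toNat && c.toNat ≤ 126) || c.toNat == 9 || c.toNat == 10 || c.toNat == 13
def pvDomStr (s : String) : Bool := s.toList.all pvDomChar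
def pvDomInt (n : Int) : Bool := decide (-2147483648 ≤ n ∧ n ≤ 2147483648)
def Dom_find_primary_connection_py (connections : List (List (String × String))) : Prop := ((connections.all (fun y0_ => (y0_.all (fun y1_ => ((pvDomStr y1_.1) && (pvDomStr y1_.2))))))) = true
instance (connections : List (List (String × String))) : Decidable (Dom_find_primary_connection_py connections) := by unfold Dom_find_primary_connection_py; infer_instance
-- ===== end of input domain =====

-- B replaces A's two sequential scans with a single loop that tracks the first
-- non-federated connection while looking for a named bigquery one (alternative decomposition, same cost).


-- ===== PORT A =====
-- conn.get(k): first match in the association list (Python dict lookup), None if absent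
def pvGetKey (conn : List (String × String)) (k : String) : Option String :=
  (conn.find? (fun p => p.1 == k)).map (·.2)

-- conn.get("type") == "bigquery" and conn.get("name")  (truthy: non-empty string)
def pvIsNamedBigquery (conn : List (String × String)) : Bool :=
  pvGetKey conn "type" == some "bigquery" &&
    (match pvGetKey conn "name" with
     | some s => s != ""
     | none => false)

-- first loop of A: first named bigquery connection
def pvLoopBQ : List (List (String × String)) → Option (List (String × String))
  | [] => none
  | c :: rest => if pvIsNamedBigquery c then some c else pvLoopBQ rest

-- second loop of A: first connection whose type is not "federated"
def pvLoopNonFed : List (List (String × String)) → Option (List (String × String))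
  | [] => none
  | c :: rest => if pvGetKey c "type" != some "federated" then some c else pvLoopNonFed rest

def find_primary_connection_py (connections : List (List (String × String))) : List (String × String) :=
  match pvLoopBQ connections with
  | some c => c
  | none =>
    match pvLoopNonFed connections with
    | some c => c
    | none =>
      match connections with
      | c :: _ => c
      | [] => []

-- ===== PORT B =====
-- the single loop of Source B: early return on named bigquery, else remember the first non-federated
def pvLoopB (connections : List (List (String × String))) :
    List (List (String × String)) → Option (List (String × String)) → List (String × String)
  | [], fnf =>
    match fnf with
    | some c => c
    | none =>
      match connections with
      | c :: _ => c
      | [] => []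
  | c :: rest, fnf =>
    if pvIsNamedBigquery c then c
    else pvLoopB connections rest
      (if fnf.isNone && (pvGetKey c "type" != some "federated") then some c else fnf)

def find_primary_connection_py_alt (connections : List (List (String × String))) : List (String × String) :=
  pvLoopB connections connections none

-- ===== PRECONDITION & SPEC =====
def Spec_find_primary_connection_py (connections : List (List (String × String))) (out : List (String × String)) : Prop := out = find_primary_connection_py_alt connections
instance (connections : List (List (String × String))) (out : List (String × String)) : Decidable (Spec_find_primary_connection_py connections out) := by unfold Spec_find_primary_connection_py; infer_instance

-- ===== CLAIM (what is proved, stated in full; the proofs are below) =====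
def Claim_equal_find_primary_connection_py : Prop := ∀ (connections : List (List (String × String))), Dom_find_primary_connection_py connections → Spec_find_primary_connection_py connections (find_primary_connection_py connections)

-- ===== LEMMAS AND PROOFS =====
-- invariant of B's loop: it returns the first named bigquery connection of the remaining list,
-- else the remembered (or newly found) first non-federated one, else the overall fallback
theorem pvLoopB_inv (connections : List (List (String × String)))
    (cs : List (List (String × String))) (fnf : Option (List (String × String))) :
    pvLoopB connections cs fnf =
      match pvLoopBQ cs with
      | some c => c
      | none =>
        match fnf with
        | some c => c
        | none =>
          match pvLoopNonFed cs with
          | some c => c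
          | none =>
            match connections with
            | c :: _ => c
            | [] => [] := by
  induction cs generalizing fnf with
  | nil => cases fnf <;> simp [pvLoopB, pvLoopBQ, pvLoopNonFed]
  | cons c rest ih =>
    simp only [pvLoopB, pvLoopBQ, pvLoopNonFed]
    by_cases hbq : pvIsNamedBigquery c
    · simp [hbq]
    · simp only [hbq]
      rw [ih]
      cases fnf with
      | some x => simp
      | none =>
        by_cases hfed : (pvGetKey c "type" != some "federated") = true
        · simp [hfed]
        · simp [hfed]

theorem find_primary_connection_py_eq (connections : List (List (String × String))) :
    find_primary_connection_py connections = find_primary_connection_py_alt connections := by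
  unfold find_primary_connection_py find_primary_connection_py_alt
  rw [pvLoopB_inv]

-- ===== VERDICT (by name: the statement is the Claim_ definition above) =====
theorem find_primary_connection_py_spec : Claim_equal_find_primary_connection_py := by
  intro connections _
  exact find_primary_connection_py_eq connections
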